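-- pv_equiv track=rewrite | github.com/lsiepman/AdventOfCode2022 | day06.py | part1
-- ===== SOURCE A (Python) =====
-- def find_marker(slice):
--     temp_set = set(slice)
--     if len(slice) == len(temp_set):
--         return True
--     else:
--         return False
--
-- def part1(data, len_slice):
--     for i in range(len(data)):
--         if i < len_slice - 1:
--             continue
--
--         slice_start = i - (len_slice - 1)
--         slice_end = i + 1 # slicing excludes last value, therefore adding one
--         if (find_marker(data[slice_start:slice_end])):
--             return i + 1
-- ===== SOURCE B (Python) =====
-- def part1(data, len_slice):
--     counts = {}
--     dups = 0
--     for i, c in enumerate(data):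
--         counts[c] = counts.get(c, 0) + 1
--         if counts[c] == 2:
--             dups += 1
--         if i >= len_slice >= 1:
--             d = data[i - len_slice]
--             counts[d] -= 1
--             if counts[d] == 1:
--                 dups -= 1
--         if dups == 0 and i >= len_slice - 1:
--             return i + 1
-- ===== Notes on version B (the rewrite author's own statement) =====
-- stated objective: faster
-- what changed: Replaced the per-position slice-and-set distinctness test (rebuilding a set of k chars at every index) by a single sliding-window pass that maintains a character-count dict and a running number of duplicated characters, updated in O(1) per step.
import Mathlib
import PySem

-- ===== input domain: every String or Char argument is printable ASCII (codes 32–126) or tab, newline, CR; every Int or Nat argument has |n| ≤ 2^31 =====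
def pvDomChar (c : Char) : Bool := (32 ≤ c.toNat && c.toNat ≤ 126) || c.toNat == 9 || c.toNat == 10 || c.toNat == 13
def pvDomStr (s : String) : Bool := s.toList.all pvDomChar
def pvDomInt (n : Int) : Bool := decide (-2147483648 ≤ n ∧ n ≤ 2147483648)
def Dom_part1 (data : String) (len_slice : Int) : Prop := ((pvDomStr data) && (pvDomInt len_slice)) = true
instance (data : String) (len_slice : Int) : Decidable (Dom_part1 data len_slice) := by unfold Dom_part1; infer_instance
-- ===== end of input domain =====

-- B replaces A's per-index slice + set rebuild by one sliding-window pass with an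
-- incrementally maintained character-count dict and duplicate counter (objective: faster).


-- ===== PORT A =====
def pvFindMarker (s : List Char) : Bool :=
  let tempSet : PySem.Set Char := PySem.Set.ofList s
  if s.length = tempSet.length then true else false

def pvALoop (l : List Char) (k : Int) : List Int → Option Int
  | [] => none
  | i :: rest =>
    if i < k - 1 then pvALoop l k rest
    else
      let sliceStart := i - (k - 1)
      let sliceEnd := i + 1
      if pvFindMarker (PySem.List.slice l (some sliceStart) (some sliceEnd)) then some (i + 1)
      else pvALoop l k rest

def part1 (data : String) (len_slice : Int) : Option Int :=
  pvALoop data.toList len_slice (PySem.List.pyRange 0 (PySem.Str.len data) 1)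

-- ===== PORT B =====
def pvBLoop (l : List Char) (k : Int) : List (Int × Char) → PySem.Dict Char Int → Int → Option Int
  | [], _, _ => none
  | (i, c) :: rest, counts, dups =>
    let counts1 := counts.insert c (counts.getD c 0 + 1)
    let dups1 := if counts1.getD c 0 = 2 then dups + 1 else dups
    if i ≥ k ∧ k ≥ 1 then
      -- d = data[i - len_slice]; the guard keeps the index in range (Python would raise otherwise)
      match PySem.List.pyGet? l (i - k) with
      | none => none
      | some d =>
        let counts2 := counts1.insert d (counts1.getD d 0 - 1)
        let dups2 := if counts2.getD d 0 = 1 then dups1 - 1 else dups1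
        if dups2 = 0 ∧ i ≥ k - 1 then some (i + 1) else pvBLoop l k rest counts2 dups2
    else
      if dups1 = 0 ∧ i ≥ k - 1 then some (i + 1) else pvBLoop l k rest counts1 dups1

def part1_alt (data : String) (len_slice : Int) : Option Int :=
  pvBLoop data.toList len_slice (PySem.List.enumerate data.toList 0) PySem.Dict.empty 0

-- ===== PRECONDITION & SPEC =====
def Spec_part1 (data : String) (len_slice : Int) (out : Option Int) : Prop := out = part1_alt data len_slice
instance (data : String) (len_slice : Int) (out : Option Int) : Decidable (Spec_part1 data len_slice out) := by unfold Spec_part1; infer_instance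

-- ===== CLAIM (what is proved, stated in full; the proofs are below) =====
def Claim_equal_part1 : Prop := ∀ (data : String) (len_slice : Int), Dom_part1 data len_slice → Spec_part1 data len_slice (part1 data len_slice)

-- ===== LEMMAS AND PROOFS =====

-- current window of B's sliding pass: the (at most K) last characters among the first j
def pvWindow (l : List Char) (K j : Nat) : List Char := (l.take j).drop (j - K)

-- the set of characters occurring more than once in s, and its size (B's `dups`)
def pvDupF (s : List Char) : Finset Char := s.toFinset.filter (fun c => 2 ≤ s.count c)
def pvDup (s : List Char) : Nat := (pvDupF s).card

lemma pvDupF_append (s : List Char) (a : Char) :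
    pvDupF (s ++ [a]) = if 1 ≤ s.count a then insert a (pvDupF s) else pvDupF s := by
  ext c
  by_cases hc : c = a
  · subst hc
    simp [pvDupF, List.count_append]
    split_ifs with h <;> simp_all
  · split_ifs with h <;>
      simp [pvDupF, List.count_append, hc, List.count_eq_zero_of_not_mem]

lemma pvDup_append (s : List Char) (a : Char) :
    pvDup (s ++ [a]) = pvDup s + (if s.count a = 1 then 1 else 0) := by
  unfold pvDup
  rw [pvDupF_append]
  rcases Nat.lt_or_ge (s.count a) 1 with h | h
  · have : ¬ 1 ≤ s.count a := by omega
    simp [this]; omega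
  · rcases Nat.lt_or_ge (s.count a) 2 with h2 | h2
    · have h1 : s.count a = 1 := by omega
      have hna : a ∉ pvDupF s := by simp [pvDupF]; omega
      simp [h1, Finset.card_insert_of_notMem hna]
    · have hma : a ∈ pvDupF s := by
        simp only [pvDupF, Finset.mem_filter, List.mem_toFinset]
        exact ⟨List.count_pos_iff.mp (by omega), h2⟩
      have h1 : ¬ s.count a = 1 := by omega
      simp [h, h1, Finset.insert_eq_self.mpr hma]

lemma pvDupF_perm {s t : List Char} (h : s.Perm t) : pvDupF s = pvDupF t := by
  unfold pvDupF
  ext c; simp [h.mem_iff, h.count_eq]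

lemma pvDup_cons (s : List Char) (a : Char) :
    pvDup (a :: s) = pvDup s + (if s.count a = 1 then 1 else 0) := by
  have h := pvDupF_perm (List.perm_append_singleton a s)
  have h2 := pvDup_append s a
  unfold pvDup at h2 ⊢
  rw [h] at h2
  exact h2

lemma pvDup_eq_zero_iff (s : List Char) : pvDup s = 0 ↔ s.Nodup := by
  unfold pvDup
  rw [Finset.card_eq_zero, List.nodup_iff_count_le_one]
  constructor
  · intro h c
    by_contra hc
    have : c ∈ pvDupF s := by
      simp [pvDupF]
      exact ⟨List.count_pos_iff.mp (by omega), by omega⟩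
    simp [h] at this
  · intro h
    ext c
    simp only [pvDupF, Finset.mem_filter, List.mem_toFinset, Finset.notMem_empty, iff_false,
      not_and, not_le]
    intro _
    have := h c
    omega

lemma pvFindMarker_iff (s : List Char) : pvFindMarker s = true ↔ s.Nodup := by
  unfold pvFindMarker
  constructor
  · intro h
    have hlen : s.length = (PySem.Set.ofList s).length := by
      by_contra hne; simp [hne] at h
    have h1 : (PySem.Set.ofList s).toFinset = s.toFinset := by
      ext c; simp [PySem.Set.mem_ofList]
    have h2 : (PySem.Set.ofList s).toFinset.card = (PySem.Set.ofList s).length :=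
      List.toFinset_card_of_nodup (PySem.Set.nodup_ofList s)
    have h3 : s.toFinset.card = s.length := by rw [← h1, h2, hlen]
    have h4 : s.dedup.length = s.length := by
      rw [List.card_toFinset] at h3; exact h3
    have := List.Sublist.eq_of_length (List.dedup_sublist s) h4
    rw [← this]; exact List.nodup_dedup s
  · intro h
    rw [PySem.Set.ofList_eq_self_of_nodup s h]
    simp

lemma pvWindow_take_succ (l : List Char) (K j : Nat) (hj : j < l.length) :
    (l.take (j+1)).drop (j - K) = pvWindow l K j ++ [l[j]] := by
  rw [List.take_add_one, List.getElem?_eq_getElem hj]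
  rw [List.drop_append_of_le_length (by simp; omega)]
  rfl

lemma pvWindow_cons (l : List Char) (K j : Nat) (hK : K ≤ j) (hj : j < l.length) :
    (l.take (j+1)).drop (j - K) = l[j - K]'(by omega) :: pvWindow l K (j+1) := by
  have hlen : (l.take (j+1)).length = j + 1 := by simp; omega
  have hlt : j - K < (l.take (j+1)).length := by omega
  rw [List.drop_eq_getElem_cons hlt]
  congr 1
  · exact List.getElem_take
  · unfold pvWindow
    congr 1
    omega

lemma pvWindow_small (l : List Char) (K j : Nat) (hK : j ≤ K) :
    pvWindow l K j = l.take j := by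
  unfold pvWindow
  rw [Nat.sub_eq_zero_of_le hK, List.drop_zero]

lemma pvWindow_slice (l : List Char) (K j : Nat) (hKj : K ≤ j + 1) :
    PySem.List.slice l (some ((j : Int) - ((K : Int) - 1))) (some ((j : Int) + 1)) =
      pvWindow l K (j+1) := by
  have h1 : (j : Int) - ((K : Int) - 1) = ((j + 1 - K : Nat) : Int) := by omega
  have h2 : (j : Int) + 1 = ((j + 1 : Nat) : Int) := by norm_cast
  rw [h1, h2, PySem.List.slice_natCast]
  unfold pvWindow
  rw [List.drop_take]

lemma pvLoop_eq (l : List Char) (k : Int) (hk : 1 ≤ k) :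
    ∀ (r p : List Char), l = p ++ r →
    ∀ (counts : PySem.Dict Char Int) (dups : Int),
    (∀ x, counts.getD x 0 = (List.count x (pvWindow l k.toNat p.length) : Int)) →
    dups = (pvDup (pvWindow l k.toNat p.length) : Int) →
    pvALoop l k (PySem.List.pyRange (p.length : Int) (l.length : Int) 1) =
      pvBLoop l k (PySem.List.enumerate r (p.length : Int)) counts dups := by
  intro r
  induction r with
  | nil =>
    intro p hl counts dups _ _
    subst hl
    rw [PySem.List.pyRange_one_eq_nil (by simp)]
    simp [pvALoop, pvBLoop, PySem.List.enumerate]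
  | cons c r' IH =>
    intro p hl counts dups hcounts hdups
    set K := k.toNat with hKdef
    have hkK : (K : Int) = k := Int.toNat_of_nonneg (by omega)
    set j := p.length with hjdef
    have hj : j < l.length := by subst hl; simp [hjdef]
    have hc : l[j]'hj = c := by
      subst hl
      rw [List.getElem_append_right (le_refl p.length)]
      simp
    set w := pvWindow l K j with hwdef
    -- one step of each loop
    rw [PySem.List.pyRange_one_cons (by exact_mod_cast hj), PySem.List.enumerate_cons]
    show (if (j:Int) < k - 1 then pvALoop l k (PySem.List.pyRange ((j:Int)+1) (l.length:Int) 1)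
      else if pvFindMarker (PySem.List.slice l (some ((j:Int) - (k-1))) (some ((j:Int)+1))) then some ((j:Int)+1)
      else pvALoop l k (PySem.List.pyRange ((j:Int)+1) (l.length:Int) 1)) = _
    -- B-side state after the insert of c
    have hcounts1 : ∀ x, (counts.insert c (counts.getD c 0 + 1)).getD x 0 = (List.count x (w ++ [c]) : Int) := by
      intro x
      rw [PySem.Dict.getD_insert]
      by_cases hx : x = c
      · subst hx; rw [if_pos rfl, hcounts x]
        simp [List.count_append]
      · rw [if_neg hx, hcounts x]
        have hx0 : List.count x [c] = 0 := List.count_eq_zero.mpr (by simp [hx])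
        simp [List.count_append, hx0]
    have hdups1 : (if (counts.insert c (counts.getD c 0 + 1)).getD c 0 = 2 then dups + 1 else dups)
        = (pvDup (w ++ [c]) : Int) := by
      rw [hcounts1 c, pvDup_append, hdups]
      have hcc : List.count c (w ++ [c]) = List.count c w + 1 := by simp [List.count_append]
      rw [hcc]
      by_cases h1 : List.count c w = 1
      · rw [if_pos (by omega), if_pos h1]; push_cast; ring
      · rw [if_neg (by omega), if_neg h1]; push_cast; ring
    have hsucc : ((j:Int) + 1) = ((j + 1 : Nat) : Int) := by norm_cast
    have hIH := fun counts' dups' hc' hd' => IH (p ++ [c]) (by simp [hl]) counts' dups' hc' hd'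
    simp only [List.length_append, List.length_cons, List.length_nil] at hIH
    norm_num at hIH
    by_cases hkj : k ≤ (j : Int)
    · -- removal branch: K ≤ j
      have hKj : K ≤ j := by omega
      have hw1 : w ++ [c] = l[j - K]'(by omega) :: pvWindow l K (j+1) := by
        rw [hwdef, ← hc, ← pvWindow_take_succ l K j hj, pvWindow_cons l K j hKj hj]
      set d := l[j - K]'(by omega) with hd
      set w' := pvWindow l K (j+1) with hw'
      have hget : PySem.List.pyGet? l ((j:Int) - k) = some d := by
        have : (j:Int) - k = ((j - K : Nat) : Int) := by omega
        rw [this, PySem.List.pyGet?_natCast, List.getElem?_eq_getElem (by omega)]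
      have hguard : ((j:Int) ≥ k ∧ k ≥ 1) := ⟨hkj, hk⟩
      rw [pvBLoop]
      rw [if_pos hguard]
      simp only [hget]
      -- counts2 invariant
      have hcounts2 : ∀ x, ((counts.insert c (counts.getD c 0 + 1)).insert d
          ((counts.insert c (counts.getD c 0 + 1)).getD d 0 - 1)).getD x 0 = (List.count x w' : Int) := by
        intro x
        rw [PySem.Dict.getD_insert]
        by_cases hx : x = d
        · subst hx
          rw [if_pos rfl, hcounts1 d, hw1, List.count_cons_self]
          push_cast; ring
        · rw [if_neg hx, hcounts1 x, hw1]
          have hxe : List.count x (d :: w') = List.count x w' := by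
            simp [(show ¬ d = x from fun h => hx h.symm)]
          rw [hxe]
      have hdups2 : (if ((counts.insert c (counts.getD c 0 + 1)).insert d
            ((counts.insert c (counts.getD c 0 + 1)).getD d 0 - 1)).getD d 0 = 1
          then (if (counts.insert c (counts.getD c 0 + 1)).getD c 0 = 2 then dups + 1 else dups) - 1
          else (if (counts.insert c (counts.getD c 0 + 1)).getD c 0 = 2 then dups + 1 else dups))
          = (pvDup w' : Int) := by
        rw [hcounts2 d, hdups1]
        have : pvDup (w ++ [c]) = pvDup w' + (if List.count d w' = 1 then 1 else 0) := by
          rw [hw1, pvDup_cons]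
        rw [this]
        by_cases h1 : List.count d w' = 1
        · rw [if_pos (by exact_mod_cast h1), if_pos h1]; push_cast; ring
        · rw [if_neg (by exact_mod_cast h1), if_neg h1]; push_cast; ring
      rw [hdups2]
      -- A side: j ≥ k - 1 holds
      rw [if_neg (show ¬((j:Int) < k - 1) from by omega)]
      have hslice : PySem.List.slice l (some ((j:Int) - (k-1))) (some ((j:Int)+1)) = w' := by
        rw [← hkK]; exact pvWindow_slice l K j (by omega)
      rw [hslice]
      by_cases hnodup : pvDup w' = 0
      · rw [if_pos (show pvFindMarker w' = true from (pvFindMarker_iff w').mpr ((pvDup_eq_zero_iff w').mp hnodup)),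
          if_pos (show ((pvDup w' : Int) = 0 ∧ (j:Int) ≥ k - 1) from ⟨by exact_mod_cast hnodup, by omega⟩)]
      · rw [if_neg (show ¬(pvFindMarker w' = true) from fun hm =>
            hnodup ((pvDup_eq_zero_iff w').mpr ((pvFindMarker_iff w').mp hm))),
          if_neg (show ¬((pvDup w' : Int) = 0 ∧ (j:Int) ≥ k - 1) from fun hcon =>
            hnodup (by exact_mod_cast hcon.1))]
        rw [hsucc]
        exact hIH _ hcounts2
    · -- no removal: j < K
      have hjK : j < K := by omega
      have hw1 : pvWindow l K (j+1) = w ++ [c] := by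
        rw [pvWindow_small l K (j+1) (by omega), hwdef, pvWindow_small l K j (by omega),
          List.take_add_one, List.getElem?_eq_getElem hj, hc]
        rfl
      rw [pvBLoop]
      rw [if_neg (show ¬((j:Int) ≥ k ∧ k ≥ 1) from fun hcon => by omega)]
      rw [hdups1]
      by_cases hjk1 : (j:Int) < k - 1
      · rw [if_pos hjk1,
          if_neg (show ¬((pvDup (w ++ [c]) : Int) = 0 ∧ (j:Int) ≥ k - 1) from fun hcon => by
            have := hcon.2; omega)]
        rw [hsucc, ← hw1]
        exact hIH _ (by rw [hw1]; exact hcounts1)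
      · rw [if_neg hjk1]
        have hslice : PySem.List.slice l (some ((j:Int) - (k-1))) (some ((j:Int)+1)) = w ++ [c] := by
          rw [← hw1, ← hkK]; exact pvWindow_slice l K j (by omega)
        rw [hslice]
        by_cases hnodup : pvDup (w ++ [c]) = 0
        · rw [if_pos (show pvFindMarker (w ++ [c]) = true from (pvFindMarker_iff _).mpr ((pvDup_eq_zero_iff _).mp hnodup)),
            if_pos (show ((pvDup (w ++ [c]) : Int) = 0 ∧ (j:Int) ≥ k - 1) from ⟨by exact_mod_cast hnodup, by omega⟩)]
        · rw [if_neg (show ¬(pvFindMarker (w ++ [c]) = true) from fun hm =>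
              hnodup ((pvDup_eq_zero_iff _).mpr ((pvFindMarker_iff _).mp hm))),
            if_neg (show ¬((pvDup (w ++ [c]) : Int) = 0 ∧ (j:Int) ≥ k - 1) from fun hcon =>
              hnodup (by exact_mod_cast hcon.1))]
          rw [hsucc, ← hw1]
          exact hIH _ (by rw [hw1]; exact hcounts1)

lemma pvNonpos_case (l : List Char) (k : Int) (hk : k ≤ 0) :
    pvALoop l k (PySem.List.pyRange 0 (l.length : Int) 1) =
      pvBLoop l k (PySem.List.enumerate l 0) PySem.Dict.empty 0 := by
  cases l with
  | nil => rfl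
  | cons c t =>
    rw [PySem.List.pyRange_one_cons (by simp), PySem.List.enumerate_cons]
    have hsl : PySem.List.slice (c :: t) (some (1 - k)) (some (1:Int)) = ([] : List Char) := by
      rw [PySem.List.slice_toNat (c :: t) (a := 1 - k) (b := (1:Int)) (by omega) (by omega)]
      have h1 : (((1:Int)).toNat - ((1:Int) - k).toNat) = 0 := by omega
      rw [h1, List.take_zero]
    have h1 : ¬((1:Int) < k) := by omega
    have h2 : ¬((0:Int) ≥ k ∧ k ≥ 1) := fun h => by omega
    have h3 : ((0:Int) ≥ k - 1) := by omega
    simp [pvALoop, pvBLoop, hsl, h1, h2, h3, pvFindMarker,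
      PySem.Dict.getD_insert_self, PySem.Dict.getD_empty]

-- ===== VERDICT (by name: the statement is the Claim_ definition above) =====
theorem part1_spec : Claim_equal_part1 := by
  intro data k _
  unfold Spec_part1 part1 part1_alt
  by_cases hk : k ≤ 0
  · simpa [PySem.Str.len_eq] using pvNonpos_case data.toList k hk
  · replace hk : 1 ≤ k := by omega
    have h := pvLoop_eq data.toList k hk data.toList [] rfl PySem.Dict.empty 0
      (by intro x; simp [pvWindow]) (by simp [pvWindow, pvDup, pvDupF])
    simpa [PySem.Str.len_eq] using h
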